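-- pv_equiv track=rewrite | github.com/deepset-ai/haystack-core-integrations | integrations/opensearch/src/haystack_integrations/document_stores/opensearch/filters.py | _get_nested_path
-- ===== SOURCE A (Python) =====
-- from typing import Any
--
-- def _get_nested_path(condition: dict[str, Any], nested_fields: set[str]) -> str | None:
--     """Returns the nested path for a comparison condition, or None."""
--     if not (field := condition.get("field")):
--         return None
--     if field.startswith("meta."):
--         field = field[5:]
--     parts = field.split(".")
--     for i in range(1, len(parts)):
--         prefix = ".".join(parts[:i])
--         if prefix in nested_fields:
--             return prefix
--     return None
-- ===== SOURCE B (Python) =====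
-- def _get_nested_path(condition, nested_fields):
--     """Returns the nested path for a comparison condition, or None."""
--     field = condition.get("field")
--     if not field:
--         return None
--     if field.startswith("meta."):
--         field = field[5:]
--     candidates = [nf for nf in nested_fields if nf != field and field.startswith(nf + ".")]
--     return min(candidates, key=len) if candidates else None
-- ===== Notes on version B (the rewrite author's own statement) =====
-- stated objective: alternative
-- what changed: Instead of enumerating the field's dotted prefixes shortest-first and probing the set for each, B filters nested_fields for proper dotted prefixes of the field (field != nf and field.startswith(nf + '.')) and returns the shortest candidate by length.
import Mathlib
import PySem

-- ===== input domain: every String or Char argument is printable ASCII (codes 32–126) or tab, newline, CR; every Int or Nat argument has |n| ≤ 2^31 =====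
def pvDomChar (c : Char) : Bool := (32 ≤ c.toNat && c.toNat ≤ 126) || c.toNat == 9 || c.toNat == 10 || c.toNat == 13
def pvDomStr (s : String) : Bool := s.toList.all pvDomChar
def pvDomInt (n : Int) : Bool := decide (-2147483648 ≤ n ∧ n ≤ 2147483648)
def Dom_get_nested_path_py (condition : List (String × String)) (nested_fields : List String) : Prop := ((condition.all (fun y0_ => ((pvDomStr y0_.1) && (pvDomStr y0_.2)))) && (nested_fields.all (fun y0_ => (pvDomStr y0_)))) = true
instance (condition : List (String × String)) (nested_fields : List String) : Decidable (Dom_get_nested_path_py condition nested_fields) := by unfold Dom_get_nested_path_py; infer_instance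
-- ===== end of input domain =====

-- B replaces A's shortest-first scan over the field's dotted prefixes by filtering
-- nested_fields for proper dotted prefixes of the field and taking the shortest
-- candidate by length (objective: alternative, same cost class).

-- ===== PORT A =====
-- the 'for i in range(1, len(parts)): prefix = ".".join(parts[:i]); if prefix in nested_fields: return prefix' loop
def pvLoopA (parts : List String) (nested_fields : List String) : List Int → Option String
  | [] => none
  | i :: rest =>
      let pfx := PySem.Str.join "." (PySem.List.slice parts none (some i))
      if PySem.Set.contains nested_fields pfx then some pfx
      else pvLoopA parts nested_fields rest

def get_nested_path_py (condition : List (String × String)) (nested_fields : List String) : Option String :=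
  match PySem.Dict.get? (PySem.Dict.mk condition) "field" with
  | none => none                                   -- condition.get("field") is None → falsy
  | some field0 =>
    if field0 = "" then none                       -- empty string is falsy
    else
      let field := if PySem.Str.startswith field0 "meta." then PySem.Str.slice field0 (some 5) none else field0
      -- parts = field.split(".") : sep "." is nonempty, so split? = some (splitOn …)
      let parts := (PySem.Chars.splitOn field.toList ['.']).map String.ofList
      pvLoopA parts nested_fields (PySem.List.pyRange 1 (parts.length : Int) 1)

-- ===== PORT B =====
def get_nested_path_py_alt (condition : List (String × String)) (nested_fields : List String) : Option String :=
  match PySem.Dict.get? (PySem.Dict.mk condition) "field" with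
  | none => none
  | some field0 =>
    if field0 = "" then none
    else
      let field := if PySem.Str.startswith field0 "meta." then PySem.Str.slice field0 (some 5) none else field0
      -- candidates = [nf for nf in nested_fields if nf != field and field.startswith(nf + ".")]
      let candidates := nested_fields.filter
        (fun nf => decide (nf ≠ field) && PySem.Chars.startswith field.toList (nf.toList ++ ['.']))
      -- min(candidates, key=len) if candidates else None
      PySem.List.min? candidates (fun s => PySem.Str.len s)

-- ===== PRECONDITION & SPEC =====
def Spec_get_nested_path_py (condition : List (String × String)) (nested_fields : List String) (out : Option String) : Prop := out = get_nested_path_py_alt condition nested_fields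
instance (condition : List (String × String)) (nested_fields : List String) (out : Option String) : Decidable (Spec_get_nested_path_py condition nested_fields out) := by unfold Spec_get_nested_path_py; infer_instance

-- ===== CLAIM (what is proved, stated in full; the proofs are below) =====
def Claim_equal_get_nested_path_py : Prop := ∀ (condition : List (String × String)) (nested_fields : List String), Dom_get_nested_path_py condition nested_fields → Spec_get_nested_path_py condition nested_fields (get_nested_path_py condition nested_fields)

-- ===== LEMMAS AND PROOFS =====

theorem pv_mh_id {α : Type} (l : List α) : List.modifyHead (fun x => x) l = l := by
  cases l <;> rfl

theorem pv_go_spec (fuel : Nat) (l cur : List Char) (acc : List (List Char)) (h : l.length < fuel) :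
    PySem.Chars.splitOn.go ['.'] fuel l cur acc
      = acc.reverse ++ (List.splitOnP (· == '.') l).modifyHead (cur.reverse ++ ·) := by
  induction fuel generalizing l cur acc with
  | zero => omega
  | succ fuel ih =>
    cases l with
    | nil => simp [PySem.Chars.splitOn.go, List.splitOnP_nil]
    | cons c rest =>
      by_cases hc : c = '.'
      · subst hc
        rw [PySem.Chars.splitOn.go]
        simp only [List.isPrefixOf, Bool.and_true, beq_self_eq_true, if_pos]
        rw [ih _ _ _ (by simpa using h)]
        simp [List.splitOnP_cons, pv_mh_id]
      · rw [PySem.Chars.splitOn.go]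
        have : List.isPrefixOf ['.'] (c :: rest) = false := by
          simp [List.isPrefixOf]; exact fun hb => absurd hb.symm hc
        rw [this]
        simp only [Bool.false_eq_true, if_false]
        rw [ih _ _ _ (by simpa using h)]
        have hcb : (c == '.') = false := by simp [hc]
        simp only [List.splitOnP_cons, hcb, Bool.false_eq_true, if_false]
        cases List.splitOnP (fun x => x == '.') rest with
        | nil => simp
        | cons a l => simp [List.modifyHead]

theorem pv_splitOn_eq (f : List Char) :
    PySem.Chars.splitOn f ['.'] = List.splitOnP (· == '.') f := by
  rw [PySem.Chars.splitOn, pv_go_spec _ _ _ _ (by omega)]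
  simp [pv_mh_id]

theorem pv_ic_cons2 (a b : List Char) (l : List (List Char)) :
    [('.' : Char)].intercalate (a :: b :: l) = a ++ '.' :: [('.' : Char)].intercalate (b :: l) := by
  simp [List.intercalate, List.intersperse]

theorem pv_ic_cons_take (c : Char) (h : List Char) (r : List (List Char)) (i : Nat) (hi : 1 ≤ i) :
    [('.' : Char)].intercalate (((c :: h) :: r).take i)
      = c :: [('.' : Char)].intercalate ((h :: r).take i) := by
  obtain ⟨m, rfl⟩ : ∃ m, i = m + 1 := ⟨i - 1, by omega⟩
  simp only [List.take_succ_cons]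
  cases hr : r.take m with
  | nil => simp [List.intercalate]
  | cons a l => rw [pv_ic_cons2, pv_ic_cons2]; simp

theorem pv_ic_dot_take (h : List Char) (r : List (List Char)) (i : Nat) (hi : 1 ≤ i) :
    [('.' : Char)].intercalate (([] :: h :: r).take (i + 1))
      = '.' :: [('.' : Char)].intercalate ((h :: r).take i) := by
  simp only [List.take_succ_cons]
  obtain ⟨m, rfl⟩ : ∃ m, i = m + 1 := ⟨i - 1, by omega⟩
  simp only [List.take_succ_cons]
  rw [pv_ic_cons2]
  simp

theorem pv_key (f q : List Char) :
    (q ++ ['.'] <+: f)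
      ↔ ∃ i, 1 ≤ i ∧ i < (List.splitOnP (· == '.') f).length
          ∧ q = [('.' : Char)].intercalate ((List.splitOnP (· == '.') f).take i) := by
  induction f generalizing q with
  | nil =>
    simp only [List.splitOnP_nil, List.length_singleton]
    constructor
    · intro hp
      have := List.prefix_nil.mp hp
      simp at this
    · rintro ⟨i, h1, h2, -⟩; omega
  | cons c t ih =>
    by_cases hc : c = '.'
    · subst hc
      have hsp : List.splitOnP (· == '.') ('.' :: t) = [] :: List.splitOnP (· == '.') t := by
        simp [List.splitOnP_cons]
      rw [hsp]
      obtain ⟨h, r, hr⟩ : ∃ h r, List.splitOnP (· == '.') t = h :: r := by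
        cases hsp2 : List.splitOnP (· == '.') t with
        | nil => exact absurd hsp2 (List.splitOnP_ne_nil _ _)
        | cons a l => exact ⟨a, l, rfl⟩
      constructor
      · intro hp
        cases q with
        | nil =>
          exact ⟨1, le_refl 1, by simp [hr], by simp [List.intercalate]⟩
        | cons a q' =>
          obtain ⟨ha, hq'⟩ : a = '.' ∧ q' ++ ['.'] <+: t := by
            obtain ⟨u, hu⟩ := hp
            simp only [List.cons_append, List.cons.injEq] at hu
            exact ⟨hu.1, ⟨u, hu.2⟩⟩
          obtain ⟨i, h1, h2, h3⟩ := (ih q').mp hq'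
          rw [hr] at h2 h3 ⊢
          refine ⟨i + 1, by omega, by simp at h2 ⊢; omega, ?_⟩
          rw [pv_ic_dot_take _ _ _ h1, ← h3, ha]
      · rintro ⟨i, h1, h2, rfl⟩
        obtain ⟨m, rfl⟩ : ∃ m, i = m + 1 := ⟨i - 1, by omega⟩
        cases Nat.eq_or_lt_of_le h1 with
        | inl h0 =>
          obtain rfl : m = 0 := by omega
          simp [List.intercalate]
        | inr hlt =>
          have hm : 1 ≤ m := by omega
          rw [hr, pv_ic_dot_take _ _ _ hm]
          have : [('.' : Char)].intercalate ((h :: r).take m) ++ ['.'] <+: t := by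
            refine (ih _).mpr ⟨m, hm, ?_, by rw [hr]⟩
            rw [hr] at h2 ⊢
            simp at h2 ⊢
            omega
          obtain ⟨u, hu⟩ := this
          exact ⟨u, by simp [← hu]⟩
    · have hcb : (c == '.') = false := by simp [hc]
      have hsp : List.splitOnP (· == '.') (c :: t)
          = List.modifyHead (List.cons c) (List.splitOnP (· == '.') t) := by
        simp [List.splitOnP_cons, hcb]
      obtain ⟨h, r, hr⟩ : ∃ h r, List.splitOnP (· == '.') t = h :: r := by
        cases hsp2 : List.splitOnP (· == '.') t with
        | nil => exact absurd hsp2 (List.splitOnP_ne_nil _ _)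
        | cons a l => exact ⟨a, l, rfl⟩
      rw [hsp, hr]
      simp only [List.modifyHead]
      constructor
      · intro hp
        cases q with
        | nil =>
          obtain ⟨u, hu⟩ := hp
          simp only [List.nil_append, List.cons_append] at hu
          exact absurd (List.cons.inj hu).1.symm hc
        | cons a q' =>
          obtain ⟨ha, hq'⟩ : a = c ∧ q' ++ ['.'] <+: t := by
            obtain ⟨u, hu⟩ := hp
            simp only [List.cons_append, List.cons.injEq] at hu
            exact ⟨hu.1, ⟨u, hu.2⟩⟩
          obtain ⟨i, h1, h2, h3⟩ := (ih q').mp hq'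
          rw [hr] at h3 h2
          refine ⟨i, h1, by simp at h2 ⊢; omega, ?_⟩
          rw [pv_ic_cons_take _ _ _ _ h1, ← h3, ha]
      · rintro ⟨i, h1, h2, rfl⟩
        rw [pv_ic_cons_take _ _ _ _ h1]
        have : [('.' : Char)].intercalate ((h :: r).take i) ++ ['.'] <+: t := by
          refine (ih _).mpr ⟨i, h1, ?_, by rw [hr]⟩
          rw [hr]
          simp at h2 ⊢
          omega
        obtain ⟨u, hu⟩ := this
        exact ⟨u, by simp [← hu]⟩

theorem pv_len_ic (l : List (List Char)) (hne : l ≠ []) :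
    ([('.' : Char)].intercalate l).length = (l.map List.length).sum + (l.length - 1) := by
  induction l with
  | nil => exact absurd rfl hne
  | cons a t ih =>
    cases t with
    | nil => simp [List.intercalate]
    | cons b r =>
      rw [pv_ic_cons2]
      simp only [List.length_append, List.length_cons, List.map_cons, List.sum_cons] at *
      rw [ih (by simp)]
      omega

theorem pv_mono (ps : List (List Char)) (i j : Nat) (hi : 1 ≤ i) (hij : i < j) (hj : j < ps.length) :
    ([('.' : Char)].intercalate (ps.take i)).length < ([('.' : Char)].intercalate (ps.take j)).length := by
  have hne1 : ps.take i ≠ [] := List.ne_nil_of_length_pos (by simp [List.length_take]; omega)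
  have hne2 : ps.take j ≠ [] := List.ne_nil_of_length_pos (by simp [List.length_take]; omega)
  rw [pv_len_ic _ hne1, pv_len_ic _ hne2]
  have hli : (ps.take i).length = i := by simp; omega
  have hlj : (ps.take j).length = j := by simp; omega
  have hpre : ps.take i <+: ps.take j := by
    rw [show ps.take i = (ps.take j).take i from by rw [List.take_take]; congr 1; omega]
    exact List.take_prefix _ _
  obtain ⟨u, hu⟩ := hpre
  have : ((ps.take j).map List.length).sum = ((ps.take i).map List.length).sum + (u.map List.length).sum := by
    rw [← hu]; simp
  rw [hli, hlj]
  omega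

theorem pv_loopA_eq_find? (parts nfs : List String) (js : List Nat) :
    pvLoopA parts nfs (js.map (Nat.cast : Nat → Int))
      = List.find? (fun p => nfs.contains p) (js.map (fun j => PySem.Str.join "." (parts.take j))) := by
  induction js with
  | nil => rfl
  | cons j t ih =>
    simp only [List.map_cons, pvLoopA, PySem.List.slice_to_natCast, PySem.Set.contains]
    cases hb : List.contains nfs (PySem.Str.join "." (parts.take j)) with
    | true => rw [if_pos rfl, List.find?_cons_of_pos hb]
    | false =>
        rw [if_neg (by simp), List.find?_cons_of_neg (by simp only [hb]; exact Bool.false_ne_true)]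
        exact ih

theorem pv_find_eq_min (P : List String) (nfs : List String) (c : String → Bool)
    (hc : ∀ x, c x = true ↔ x ∈ P)
    (hP : P.Pairwise (fun a b => a.toList.length < b.toList.length)) :
    List.find? (fun p => nfs.contains p) P
      = PySem.List.min? (nfs.filter c) (fun s => PySem.Str.len s) := by
  induction P generalizing c with
  | nil =>
    have : nfs.filter c = [] := by
      apply List.filter_eq_nil_iff.mpr
      intro x _ hx
      simp [hc x] at hx
    simp [this, PySem.List.min?]
  | cons p P' ih =>
    rw [List.find?_cons]
    by_cases hp : nfs.contains p
    · rw [hp]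
      have hpmem : p ∈ nfs.filter c := by
        rw [List.mem_filter]
        exact ⟨List.contains_iff_mem.mp hp, (hc p).mpr (List.mem_cons_self)⟩
      cases hm : PySem.List.min? (nfs.filter c) (fun s => PySem.Str.len s) with
      | none =>
        rw [PySem.List.min?_eq_none_iff] at hm
        rw [hm] at hpmem
        simp at hpmem
      | some m =>
        have hmmem := PySem.List.min?_mem hm
        have hmin := PySem.List.min?_isMin hm p hpmem
        have hmP : m ∈ p :: P' := (hc m).mp (List.mem_filter.mp hmmem).2
        cases List.mem_cons.mp hmP with
        | inl h => rw [h]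
        | inr h =>
          exfalso
          have hlt : p.toList.length < m.toList.length := (List.pairwise_cons.mp hP).1 m h
          simp only [PySem.Str.len] at hmin
          omega
    · rw [show nfs.contains p = false by simpa using hp]
      have hpn : p ∉ nfs := fun h => hp (List.contains_iff_mem.mpr h)
      have hfe : nfs.filter c = nfs.filter (fun x => decide (x ∈ P')) := by
        apply List.filter_congr
        intro x hx
        have hxp : x ≠ p := fun h => hpn (h ▸ hx)
        rw [Bool.eq_iff_iff]
        simp only [hc x, List.mem_cons, decide_eq_true_eq]
        simp [hxp]
      rw [hfe]
      exact ih _ (fun x => by simp) (List.pairwise_cons.mp hP).2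

theorem pv_join_take (sp : List (List Char)) (j : Nat) :
    PySem.Str.join "." ((sp.map String.ofList).take j)
      = String.ofList ([('.' : Char)].intercalate (sp.take j)) := by
  have hdot : ".".toList = ['.'] := by decide
  simp only [PySem.Str.join, PySem.Chars.join, hdot]
  congr 1
  rw [← List.map_take, List.map_map]
  rw [show String.toList ∘ String.ofList = id from funext (fun l => String.toList_ofList), List.map_id]

theorem pv_core (field : String) (nfs : List String) :
    pvLoopA ((PySem.Chars.splitOn field.toList ['.']).map String.ofList) nfs
        (PySem.List.pyRange 1 (((PySem.Chars.splitOn field.toList ['.']).map String.ofList).length : Int) 1)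
      = PySem.List.min?
          (nfs.filter (fun nf => decide (nf ≠ field) && PySem.Chars.startswith field.toList (nf.toList ++ ['.'])))
          (fun s => PySem.Str.len s) := by
  rw [pv_splitOn_eq]
  set f := field.toList with hf
  set sp := List.splitOnP (· == '.') f with hsp
  set N := sp.length with hN
  have hNe : (List.splitOnP (fun x => x == '.') f).length = N := by rw [hN]
  have hN1 : 1 ≤ N := List.length_pos_of_ne_nil (List.splitOnP_ne_nil _ _)
  have hrange : PySem.List.pyRange 1 ((sp.map String.ofList).length : Int) 1
      = (List.range' 1 (N - 1)).map (Nat.cast : Nat → Int) := by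
    rw [PySem.List.pyRange_one, List.range'_eq_map_range, List.map_map]
    have hlen : (((sp.map String.ofList).length : Int) - 1).toNat = N - 1 := by
      simp [hN]
    rw [hlen]
    apply List.map_congr_left
    intro k _
    simp [Function.comp]
  rw [hrange, pv_loopA_eq_find?]
  have hmapeq : (List.range' 1 (N - 1)).map (fun j => PySem.Str.join "." ((sp.map String.ofList).take j))
      = (List.range' 1 (N - 1)).map (fun j => String.ofList ([('.' : Char)].intercalate (sp.take j))) := by
    apply List.map_congr_left
    intro j _
    exact pv_join_take sp j
  rw [hmapeq]
  apply pv_find_eq_min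
  · intro x
    simp only [Bool.and_eq_true, decide_eq_true_eq, PySem.Chars.startswith_iff, List.mem_map]
    constructor
    · rintro ⟨hne, hpre⟩
      obtain ⟨i, h1, h2, h3⟩ := (pv_key f x.toList).mp hpre
      rw [hNe] at h2
      exact ⟨i, by rw [List.mem_range'_1]; omega, by rw [← h3, String.ofList_toList]⟩
    · rintro ⟨j, hj, rfl⟩
      rw [List.mem_range'_1] at hj
      have hpre : (String.ofList ([('.' : Char)].intercalate (sp.take j))).toList ++ ['.'] <+: f := by
        rw [String.toList_ofList]
        exact (pv_key f _).mpr ⟨j, hj.1, by rw [hNe]; omega, rfl⟩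
      refine ⟨?_, hpre⟩
      intro hx
      have hlen := List.IsPrefix.length_le hpre
      rw [hx, hf] at hlen
      simp at hlen
  · rw [List.pairwise_map]
    have hpl : (List.range' 1 (N - 1)).Pairwise (· < ·) := List.pairwise_lt_range' ..
    refine hpl.imp_of_mem ?_
    intro a b ha hb hab
    rw [List.mem_range'_1] at ha hb
    simp only [String.toList_ofList]
    exact pv_mono sp a b ha.1 hab (by omega)

-- ===== VERDICT (by name: the statement is the Claim_ definition above) =====
theorem get_nested_path_py_spec : Claim_equal_get_nested_path_py := by
  intro condition nested_fields _
  unfold Spec_get_nested_path_py get_nested_path_py get_nested_path_py_alt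
  cases PySem.Dict.get? (PySem.Dict.mk condition) "field" with
  | none => rfl
  | some field0 =>
      by_cases h0 : field0 = ""
      · simp [h0]
      · simp only [h0, if_false]
        exact pv_core _ nested_fields
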